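-- pv_equiv track=rewrite | github.com/wesley511/ioi-colony | worker_decision_v2.py | collapse_last_reinforced_sections
-- ===== SOURCE A (Python) =====
-- from typing import Any, Dict, List, Tuple
--
-- def collapse_last_reinforced_sections(lines: List[str]) -> List[str]:
--     ranges: List[Tuple[int, int]] = []
--     idx = 0
--
--     while idx < len(lines):
--         if lines[idx].strip() != "- last_reinforced:":
--             idx += 1
--             continue
--
--         end = idx + 1
--         while end < len(lines) and lines[end].startswith("  - "):
--             end += 1
--         ranges.append((idx, end))
--         idx = end
--
--     if len(ranges) <= 1:
--         return lines
--
--     skip_indexes = set()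
--     for start, end in ranges[:-1]:
--         skip_indexes.update(range(start, end))
--
--     result: List[str] = []
--     for idx, line in enumerate(lines):
--         if idx in skip_indexes:
--             continue
--         result.append(line)
--
--     return result
-- ===== SOURCE B (Python) =====
-- from typing import List
--
-- def collapse_last_reinforced_sections(lines: List[str]) -> List[str]:
--     n = len(lines)
--     # pass 1: count sections and remember the start index of the last one
--     count = 0
--     last = -1
--     i = 0
--     while i < n:
--         if lines[i].strip() == "- last_reinforced:":
--             count += 1
--             last = i
--             i += 1
--             while i < n and lines[i].startswith("  - "):
--                 i += 1
--         else:
--             i += 1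
--     if count <= 1:
--         return lines
--     # pass 2: rebuild, keeping only the last section and non-section lines
--     result: List[str] = []
--     i = 0
--     while i < n:
--         if lines[i].strip() == "- last_reinforced:":
--             keep = i == last
--             if keep:
--                 result.append(lines[i])
--             i += 1
--             while i < n and lines[i].startswith("  - "):
--                 if keep:
--                     result.append(lines[i])
--                 i += 1
--         else:
--             result.append(lines[i])
--             i += 1
--     return result
-- ===== Notes on version B (the rewrite author's own statement) =====
-- stated objective: simpler
-- what changed: B replaces A's ranges list, skip-index set and enumerate-filter pipeline by two direct scans: one pass that counts sections and remembers only the last section's start index, and one rebuilding pass with a local keep flag that emits or drops each section as it is re-encountered.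
import Mathlib
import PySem

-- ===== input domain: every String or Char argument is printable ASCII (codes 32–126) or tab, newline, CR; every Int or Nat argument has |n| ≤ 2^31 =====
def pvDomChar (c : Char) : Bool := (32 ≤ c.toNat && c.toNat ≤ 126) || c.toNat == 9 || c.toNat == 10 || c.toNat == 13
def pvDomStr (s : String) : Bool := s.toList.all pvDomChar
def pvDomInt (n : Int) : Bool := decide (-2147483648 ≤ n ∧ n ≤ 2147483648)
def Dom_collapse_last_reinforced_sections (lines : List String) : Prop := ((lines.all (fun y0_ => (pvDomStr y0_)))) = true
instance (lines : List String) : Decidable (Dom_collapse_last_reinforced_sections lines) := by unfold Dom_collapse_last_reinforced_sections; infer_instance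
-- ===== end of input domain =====

-- B keeps only the last section's start index and a keep flag instead of A's ranges list + skip-index set; same values, simpler bookkeeping.

-- ===== PORT A =====
-- inner while: 'end = idx+1; while end < len(lines) and lines[end].startswith("  - "): end += 1'
def aEnd (lines : List String) (e : Nat) : Nat :=
  if e < lines.length ∧ PySem.Str.startswith (lines.getD e "") "  - " = true then
    aEnd lines (e + 1)
  else e
termination_by lines.length - e

theorem aEnd_ge (lines : List String) (e : Nat) : e ≤ aEnd lines e := by
  fun_induction aEnd lines e with
  | case1 e h ih => omega
  | case2 e h => omega

-- outer while collecting 'ranges'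
def aRanges (lines : List String) (idx : Nat) : List (Nat × Nat) :=
  if _h : idx < lines.length then
    if PySem.Str.strip (lines.getD idx "") ≠ "- last_reinforced:" then
      aRanges lines (idx + 1)
    else
      (idx, aEnd lines (idx + 1)) :: aRanges lines (aEnd lines (idx + 1))
  else []
termination_by lines.length - idx
decreasing_by
  · omega
  · have := aEnd_ge lines (idx + 1); omega

def collapse_last_reinforced_sections (lines : List String) : List String :=
  let ranges := aRanges lines 0
  if ranges.length ≤ 1 then lines
  else
    let skip : PySem.Set Int :=
      ranges.dropLast.foldl
        (fun s r => PySem.Set.update s (PySem.List.pyRange (r.1 : Int) (r.2 : Int) 1))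
        PySem.Set.empty
    (PySem.List.enumerate lines 0).foldl
      (fun acc p => if PySem.Set.contains skip p.1 then acc else acc ++ [p.2]) []

-- ===== PORT B =====
-- pass 1: count sections, remember the last section's start ('count', 'last', jumping over bodies)
def bSkipBody (lines : List String) (i : Nat) : Nat :=
  if i < lines.length ∧ PySem.Str.startswith (lines.getD i "") "  - " = true then
    bSkipBody lines (i + 1)
  else i
termination_by lines.length - i

theorem bSkipBody_ge (lines : List String) (i : Nat) : i ≤ bSkipBody lines i := by
  fun_induction bSkipBody lines i with
  | case1 i h ih => omega
  | case2 i h => omega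

def bScan (lines : List String) (i : Nat) (count last : Int) : Int × Int :=
  if _h : i < lines.length then
    if PySem.Str.strip (lines.getD i "") = "- last_reinforced:" then
      bScan lines (bSkipBody lines (i + 1)) (count + 1) (i : Int)
    else
      bScan lines (i + 1) count last
  else (count, last)
termination_by lines.length - i
decreasing_by
  · have := bSkipBody_ge lines (i + 1); omega
  · omega

-- pass 2 inner while: emit (or drop) the '  - ' body lines, return the kept lines and the next index
def bBody (lines : List String) (i : Nat) (keep : Bool) : List String × Nat :=
  if i < lines.length ∧ PySem.Str.startswith (lines.getD i "") "  - " = true then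
    ((if keep then [lines.getD i ""] else []) ++ (bBody lines (i + 1) keep).1,
     (bBody lines (i + 1) keep).2)
  else ([], i)
termination_by lines.length - i

theorem bBody_ge (lines : List String) (i : Nat) (keep : Bool) : i ≤ (bBody lines i keep).2 := by
  fun_induction bBody lines i keep with
  | case1 i h ih => dsimp only; omega
  | case2 i h => simp

-- pass 2 outer loop ('keep' inlined at its two uses)
def bBuild (lines : List String) (i : Nat) (last : Int) : List String :=
  if _h : i < lines.length then
    if PySem.Str.strip (lines.getD i "") = "- last_reinforced:" then
      (if ((i : Int) == last) then [lines.getD i ""] else [])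
        ++ (bBody lines (i + 1) ((i : Int) == last)).1
        ++ bBuild lines ((bBody lines (i + 1) ((i : Int) == last)).2) last
    else
      lines.getD i "" :: bBuild lines (i + 1) last
  else []
termination_by lines.length - i
decreasing_by
  · have := bBody_ge lines (i + 1) ((i : Int) == last); omega
  · omega

def collapse_last_reinforced_sections_alt (lines : List String) : List String :=
  let cl := bScan lines 0 0 (-1)
  if cl.1 ≤ 1 then lines
  else bBuild lines 0 cl.2

-- ===== PRECONDITION & SPEC =====
def Spec_collapse_last_reinforced_sections (lines : List String) (out : List String) : Prop := out = collapse_last_reinforced_sections_alt lines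
instance (lines : List String) (out : List String) : Decidable (Spec_collapse_last_reinforced_sections lines out) := by unfold Spec_collapse_last_reinforced_sections; infer_instance

-- ===== CLAIM (what is proved, stated in full; the proofs are below) =====
def Claim_equal_collapse_last_reinforced_sections : Prop := ∀ (lines : List String), Dom_collapse_last_reinforced_sections lines → Spec_collapse_last_reinforced_sections lines (collapse_last_reinforced_sections lines)

-- ===== LEMMAS AND PROOFS =====

-- step equations
theorem aEnd_pos {lines : List String} {e : Nat}
    (h : e < lines.length ∧ PySem.Str.startswith (lines.getD e "") "  - " = true) :
    aEnd lines e = aEnd lines (e + 1) := by rw [aEnd, if_pos h]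

theorem aEnd_neg {lines : List String} {e : Nat}
    (h : ¬ (e < lines.length ∧ PySem.Str.startswith (lines.getD e "") "  - " = true)) :
    aEnd lines e = e := by rw [aEnd, if_neg h]

theorem aRanges_stop {lines : List String} {i : Nat} (h : ¬ i < lines.length) :
    aRanges lines i = [] := by rw [aRanges, dif_neg h]

theorem aRanges_skip {lines : List String} {i : Nat} (h1 : i < lines.length)
    (h2 : PySem.Str.strip (lines.getD i "") ≠ "- last_reinforced:") :
    aRanges lines i = aRanges lines (i + 1) := by rw [aRanges, dif_pos h1, if_pos h2]

theorem aRanges_hit {lines : List String} {i : Nat} (h1 : i < lines.length)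
    (h2 : PySem.Str.strip (lines.getD i "") = "- last_reinforced:") :
    aRanges lines i = (i, aEnd lines (i + 1)) :: aRanges lines (aEnd lines (i + 1)) := by
  rw [aRanges, dif_pos h1, if_neg (by simpa [List.getD] using h2)]

theorem bBuild_stop {lines : List String} {i : Nat} {last : Int} (h : ¬ i < lines.length) :
    bBuild lines i last = [] := by rw [bBuild, dif_neg h]

theorem bBuild_skip {lines : List String} {i : Nat} {last : Int} (h1 : i < lines.length)
    (h2 : PySem.Str.strip (lines.getD i "") ≠ "- last_reinforced:") :
    bBuild lines i last = lines.getD i "" :: bBuild lines (i + 1) last := by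
  rw [bBuild, dif_pos h1, if_neg h2]

theorem bBuild_hit {lines : List String} {i : Nat} {last : Int} (h1 : i < lines.length)
    (h2 : PySem.Str.strip (lines.getD i "") = "- last_reinforced:") :
    bBuild lines i last =
      (if ((i : Int) == last) then [lines.getD i ""] else [])
        ++ (bBody lines (i + 1) ((i : Int) == last)).1
        ++ bBuild lines ((bBody lines (i + 1) ((i : Int) == last)).2) last := by
  rw [bBuild, dif_pos h1, if_pos h2]

theorem bSkipBody_eq_aEnd (lines : List String) (i : Nat) : bSkipBody lines i = aEnd lines i := by
  fun_induction bSkipBody lines i with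
  | case1 i h ih => rw [ih, aEnd_pos h]
  | case2 i h => rw [aEnd_neg h]

theorem bBody_snd (lines : List String) (i : Nat) (keep : Bool) :
    (bBody lines i keep).2 = aEnd lines i := by
  fun_induction bBody lines i keep with
  | case1 i h ih => dsimp only; rw [aEnd_pos h]; exact ih
  | case2 i h => dsimp only; rw [aEnd_neg h]

theorem aEnd_le (lines : List String) (i : Nat) (h : i ≤ lines.length) :
    aEnd lines i ≤ lines.length := by
  fun_induction aEnd lines i with
  | case1 i h' ih => exact ih (by omega)
  | case2 i h' => exact h

theorem aRanges_start_ge (lines : List String) (i : Nat) :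
    ∀ r ∈ aRanges lines i, i ≤ r.1 := by
  fun_induction aRanges lines i with
  | case1 i h1 h2 ih => intro r hr; have := ih r hr; omega
  | case2 i h1 h2 ih =>
      intro r hr
      rcases List.mem_cons.mp hr with rfl | h
      · simp
      · have := ih r h; have := aEnd_ge lines (i + 1); omega
  | case3 i h1 => simp

theorem bBody_fst (lines : List String) (i : Nat) (keep : Bool) :
    (bBody lines i keep).1 =
      if keep then (lines.drop i).take (aEnd lines i - i) else [] := by
  fun_induction bBody lines i keep with
  | case1 i h ih =>
      dsimp only
      rw [ih, aEnd_pos h]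
      have hge := aEnd_ge lines (i + 1)
      have hgd : lines.getD i "" = lines[i] := by
        rw [List.getD_eq_getElem?_getD, List.getElem?_eq_getElem h.1]; rfl
      cases keep with
      | false => simp
      | true =>
          simp only [if_true]
          rw [List.drop_eq_getElem_cons h.1,
            show aEnd lines (i + 1) - i = (aEnd lines (i + 1) - (i + 1)) + 1 from by omega,
            List.take_succ_cons]
          simp [List.getElem?_eq_getElem h.1]
  | case2 i h => rw [aEnd_neg h]; simp

theorem bScan_spec (lines : List String) (i : Nat) (c l : Int) :
    bScan lines i c l =
      (c + ((aRanges lines i).length : Int),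
       (((aRanges lines i).getLast?).map (fun r => ((r.1 : Nat) : Int))).getD l) := by
  fun_induction bScan lines i c l with
  | case1 i c l h1 h2 ih =>
      rw [bSkipBody_eq_aEnd] at ih ⊢
      rw [ih, aRanges_hit h1 h2]
      rcases hT : aRanges lines (aEnd lines (i + 1)) with _ | ⟨t, T⟩
      · simp
      · rw [List.getLast?_cons_cons,
          List.getLast?_eq_some_getLast (List.cons_ne_nil t T)]
        simp only [List.length_cons, Option.map_some, Option.getD_some, Prod.mk.injEq]
        refine ⟨by push_cast; ring, trivial⟩
  | case2 i c l h1 h2 ih => rw [ih, aRanges_skip h1 h2]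
  | case3 i c l h1 => rw [aRanges_stop h1]; simp

theorem set_contains_iff {s : PySem.Set Int} {x : Int} :
    PySem.Set.contains s x = true ↔ x ∈ s := by simp [PySem.Set.contains]

theorem getLast?_cons_ne {α : Type} (a : α) (l : List α) (h : l ≠ []) :
    (a :: l).getLast? = l.getLast? := by
  cases l with
  | nil => exact absurd rfl h
  | cons b m => exact List.getLast?_cons_cons

-- membership in A's skip set
theorem skipFold_mem (rs : List (Nat × Nat)) (s0 : PySem.Set Int) (j : Int) :
    (j ∈ rs.foldl
        (fun s r => PySem.Set.update s (PySem.List.pyRange (r.1 : Int) (r.2 : Int) 1)) s0)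
      ↔ j ∈ s0 ∨ ∃ r ∈ rs, (r.1 : Int) ≤ j ∧ j < (r.2 : Int) := by
  induction rs generalizing s0 with
  | nil => simp
  | cons r rs ih =>
      simp only [List.foldl_cons, ih, PySem.Set.mem_update, PySem.List.mem_pyRange_one,
        List.mem_cons]
      constructor
      · rintro ((h | h) | ⟨r', hr', h⟩)
        · exact Or.inl h
        · exact Or.inr ⟨r, Or.inl rfl, h⟩
        · exact Or.inr ⟨r', Or.inr hr', h⟩
      · rintro (h | ⟨r', (rfl | hr'), h⟩)
        · exact Or.inl (Or.inl h)
        · exact Or.inl (Or.inr h)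
        · exact Or.inr ⟨r', hr', h⟩

-- A's result loop as filter+map
theorem foldl_skipfilter (l : List (Int × String)) (c : Int → Bool) (acc : List String) :
    l.foldl (fun acc p => if c p.1 then acc else acc ++ [p.2]) acc
      = acc ++ (l.filter (fun p => !c p.1)).map (fun p => p.2) := by
  induction l generalizing acc with
  | nil => simp
  | cons p l ih => cases hc : c p.1 <;> simp [ih, hc]

-- the main induction: from any scan point i, A's filtered tail equals B's rebuild
theorem mainAux (lines : List String) (skip : PySem.Set Int) :
    ∀ (m i : Nat) (last : Int), lines.length ≤ m + i →
    (∀ j : Nat, i ≤ j →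
      ((PySem.Set.contains skip (j : Int) = true) ↔
        ∃ r ∈ (aRanges lines i).dropLast, r.1 ≤ j ∧ j < r.2)) →
    ((aRanges lines i).getLast? = none → last < (i : Int)) →
    (∀ r : Nat × Nat, (aRanges lines i).getLast? = some r → last = (r.1 : Int)) →
    ((PySem.List.enumerate (lines.drop i) (i : Int)).filter
        (fun p => !PySem.Set.contains skip p.1)).map (fun p => p.2)
      = bBuild lines i last := by
  intro m
  induction m with
  | zero =>
      intro i last hlen _ _ _
      rw [List.drop_eq_nil_of_le (by omega), bBuild_stop (by omega)]
      simp [PySem.List.enumerate_nil]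
  | succ m ih =>
      intro i last hlen Hsk Hl0 HlS
      by_cases hn : i < lines.length
      · have hgd : lines.getD i "" = lines[i] := by
          rw [List.getD_eq_getElem?_getD, List.getElem?_eq_getElem hn]; rfl
        by_cases hh : PySem.Str.strip (lines.getD i "") = "- last_reinforced:"
        · -- header at i
          obtain ⟨e, he⟩ : ∃ x, aEnd lines (i + 1) = x := ⟨_, rfl⟩
          have hei : i + 1 ≤ e := he ▸ aEnd_ge lines (i + 1)
          have hen : e ≤ lines.length := he ▸ aEnd_le lines (i + 1) (by omega)
          have hR : aRanges lines i = (i, e) :: aRanges lines e := by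
            rw [aRanges_hit hn hh, he]
          -- split the tail at e
          have hsplit : lines.drop i = (lines.drop i).take (e - i) ++ lines.drop e := by
            have h1 : lines.drop e = (lines.drop i).drop (e - i) := by
              rw [List.drop_drop]; congr 1; omega
            rw [h1, List.take_append_drop]
          have hseglen : ((lines.drop i).take (e - i)).length = e - i := by
            simp [List.length_take, List.length_drop]; omega
          rw [hsplit, PySem.List.enumerate_append, List.filter_append, List.map_append,
            hseglen]
          have hcast : (i : Int) + ((e - i : Nat) : Int) = ((e : Nat) : Int) := by
            push_cast; omega
          rw [hcast]
          by_cases hT : aRanges lines e = []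
          · -- this is the LAST section: keep it whole
            rw [hT] at hR
            have hlast : last = (i : Int) := HlS (i, e) (by rw [hR]; rfl)
            have hnone : ∀ j : Nat, i ≤ j → ¬ PySem.Set.contains skip (j : Int) = true := by
              intro j hj h
              rcases (Hsk j hj).mp h with ⟨r, hr, _⟩
              rw [hR] at hr
              simp at hr
            have hfilter :
                ((PySem.List.enumerate ((lines.drop i).take (e - i)) (i : Int)).filter
                  (fun p => !PySem.Set.contains skip p.1))
                = PySem.List.enumerate ((lines.drop i).take (e - i)) (i : Int) := by
              apply List.filter_eq_self.mpr
              intro p hp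
              rcases (PySem.List.mem_enumerate_iff _ _ p).mp hp with ⟨k, hk, rfl⟩
              have hc : (i : Int) + (k : Int) = ((i + k : Nat) : Int) := by push_cast; ring
              simp only [hc]
              rcases hcb : PySem.Set.contains skip ((i + k : Nat) : Int) with _ | _
              · simp
              · exact absurd hcb (hnone _ (by omega))
            have hkeq : ((i : Int) == last) = true := by simp [hlast]
            have hseg : (lines.drop i).take (e - i)
                = lines[i] :: (lines.drop (i + 1)).take (e - (i + 1)) := by
              rw [List.drop_eq_getElem_cons hn,
                show e - i = (e - (i + 1)) + 1 from by omega, List.take_succ_cons]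
            have hrec := ih e last (by omega)
              (by intro j hj
                  have h2 := Hsk j (by omega)
                  rw [hR] at h2
                  rw [hT]
                  simpa using h2)
              (by intro _; rw [hlast]; omega)
              (by intro r hr; rw [hT] at hr; simp at hr)
            rw [hfilter, PySem.List.map_snd_enumerate, hseg, hrec,
              bBuild_hit hn hh, hkeq, bBody_fst, bBody_snd, he]
            simp [hgd, List.getElem?_eq_getElem hn]
          · -- NOT the last section: drop it whole
            have hTne : aRanges lines e ≠ [] := hT
            have hdl : ((i, e) :: aRanges lines e).dropLast
                = (i, e) :: (aRanges lines e).dropLast :=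
              List.dropLast_cons_of_ne_nil hTne
            have hsome : (aRanges lines e).getLast?
                = some ((aRanges lines e).getLast hTne) :=
              List.getLast?_eq_some_getLast hTne
            have hlast : last = (((aRanges lines e).getLast hTne).1 : Int) := by
              apply HlS
              rw [hR, getLast?_cons_ne _ _ hTne, hsome]
            have hlge : e ≤ ((aRanges lines e).getLast hTne).1 :=
              aRanges_start_ge lines e _ (List.getLast_mem hTne)
            have hall : ∀ j : Nat, i ≤ j → j < e →
                PySem.Set.contains skip (j : Int) = true := by
              intro j hj hje
              apply (Hsk j hj).mpr
              rw [hR, hdl]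
              exact ⟨(i, e), by simp, by omega⟩
            have hfilter :
                ((PySem.List.enumerate ((lines.drop i).take (e - i)) (i : Int)).filter
                  (fun p => !PySem.Set.contains skip p.1)) = [] := by
              apply List.filter_eq_nil_iff.mpr
              intro p hp
              rcases (PySem.List.mem_enumerate_iff _ _ p).mp hp with ⟨k, hk, rfl⟩
              rw [hseglen] at hk
              have hc : (i : Int) + (k : Int) = ((i + k : Nat) : Int) := by push_cast; ring
              simp only [hc]
              rw [hall (i + k) (by omega) (by omega)]
              simp
            have hkeq : ((i : Int) == last) = false := by
              rw [hlast]
              simp only [beq_eq_false_iff_ne, ne_eq, Int.natCast_inj]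
              omega
            have hrec := ih e last (by omega)
              (by intro j hj
                  have h2 := Hsk j (by omega)
                  rw [hR, hdl] at h2
                  rw [h2]
                  simp only [List.mem_cons]
                  constructor
                  · rintro ⟨r, (rfl | hr), hb⟩
                    · omega
                    · exact ⟨r, hr, hb⟩
                  · rintro ⟨r, hr, hb⟩
                    exact ⟨r, Or.inr hr, hb⟩)
              (by intro h; rw [hsome] at h; simp at h)
              (by intro r hr; rw [hsome] at hr; simp at hr; rw [hlast, hr])
            rw [hfilter]
            simp only [List.map_nil, List.nil_append]
            rw [bBuild_hit hn hh, hkeq, bBody_fst, bBody_snd, he]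
            simpa using hrec
        · -- non-header line at i: kept on both sides
          have hR : aRanges lines i = aRanges lines (i + 1) := aRanges_skip hn hh
          have hnotin : PySem.Set.contains skip (i : Int) = false := by
            rcases hb : PySem.Set.contains skip (i : Int) with _ | _
            · rfl
            · exfalso
              rcases (Hsk i le_rfl).mp hb with ⟨r, hr, hb1, hb2⟩
              have hrm : r ∈ aRanges lines (i + 1) := by
                rw [← hR]; exact List.mem_of_mem_dropLast hr
              have := aRanges_start_ge lines (i + 1) r hrm
              omega
          rw [List.drop_eq_getElem_cons hn, PySem.List.enumerate_cons, List.filter_cons]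
          simp only [hnotin, Bool.not_false, if_true, List.map_cons]
          rw [bBuild_skip hn hh, hgd]
          congr 1
          have hcast : (i : Int) + 1 = ((i + 1 : Nat) : Int) := by push_cast; ring
          rw [hcast]
          exact ih (i + 1) last (by omega)
            (by intro j hj; rw [← hR]; exact Hsk j (by omega))
            (by intro h
                have := Hl0 (by rw [hR]; exact h)
                omega)
            (by intro r hr; exact HlS r (by rw [hR]; exact hr))
      · rw [List.drop_eq_nil_of_le (by omega), bBuild_stop hn]
        simp [PySem.List.enumerate_nil]

theorem collapse_last_reinforced_sections_spec : Claim_equal_collapse_last_reinforced_sections := by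
  intro lines _
  unfold Spec_collapse_last_reinforced_sections
  unfold collapse_last_reinforced_sections collapse_last_reinforced_sections_alt
  simp only
  rw [bScan_spec]
  by_cases hlen : (aRanges lines 0).length ≤ 1
  · rw [if_pos hlen, if_pos (by simp only; omega)]
  · rw [if_neg hlen, if_neg (by simp only; omega)]
    have hne : aRanges lines 0 ≠ [] := by
      intro h; rw [h] at hlen; simp at hlen
    have hsome : (aRanges lines 0).getLast?
        = some ((aRanges lines 0).getLast hne) := List.getLast?_eq_some_getLast hne
    rw [hsome]
    simp only [Option.map_some, Option.getD_some]
    rw [foldl_skipfilter]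
    simp only [List.nil_append]
    have hmain := mainAux lines
      ((aRanges lines 0).dropLast.foldl
        (fun s r => PySem.Set.update s (PySem.List.pyRange (r.1 : Int) (r.2 : Int) 1))
        PySem.Set.empty)
      lines.length 0 ((((aRanges lines 0).getLast hne).1 : Nat) : Int)
      (by omega)
      (by intro j _
          rw [set_contains_iff, skipFold_mem]
          simp [PySem.Set.empty])
      (by intro h; rw [hsome] at h; simp at h)
      (by intro r hr; rw [hsome] at hr; simp at hr; rw [hr])
    simpa using hmain
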